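-- pv_equiv track=rewrite | github.com/reviewboard/reviewboard | reviewboard/diffviewer/myersdiff.py | _very_approx_sqrt
-- ===== SOURCE A (Python) =====
-- def _very_approx_sqrt(
--
--     i: int,
-- ) -> int:
--     """Perform an extremely inaccurate square root.
--
--     Args:
--         i (int):
--             The number to operate on.
--
--     Returns:
--         int:
--         Something vaguely square-root like.
--     """
--     result = 1
--     i //= 4
--
--     while i > 0:
--         i //= 4
--         result *= 2
--
--     return result
-- ===== SOURCE B (Python) =====
-- def _very_approx_sqrt(
--     i: int,
-- ) -> int:
--     """Closed form: result = 2 ** floor(log4(i)) for i >= 1, else 1."""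
--     if i <= 0:
--         return 1
--
--     return 1 << ((i.bit_length() - 1) // 2)
-- ===== Notes on version B (the rewrite author's own statement) =====
-- stated objective: simpler
-- what changed: Replaced the divide-by-4 loop with its doubling accumulator by a single closed-form bit shift computed from the input's bit length; non-positive inputs return the loop's untouched initial result.
import Mathlib
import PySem

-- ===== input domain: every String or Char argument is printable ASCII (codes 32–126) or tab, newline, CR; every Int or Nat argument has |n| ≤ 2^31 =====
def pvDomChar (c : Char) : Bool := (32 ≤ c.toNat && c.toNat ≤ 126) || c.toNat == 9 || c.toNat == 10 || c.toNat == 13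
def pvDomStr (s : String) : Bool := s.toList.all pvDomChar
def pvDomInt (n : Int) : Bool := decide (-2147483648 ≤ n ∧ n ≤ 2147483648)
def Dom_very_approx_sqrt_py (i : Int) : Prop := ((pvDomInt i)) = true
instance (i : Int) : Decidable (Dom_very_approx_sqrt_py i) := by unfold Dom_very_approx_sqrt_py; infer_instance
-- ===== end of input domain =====

-- B replaces A's divide-by-4 loop with a closed-form bit-shift expression (simpler; no loop state).


-- ===== PORT A =====
-- 'i //= 4': Python floor division; for the positive divisor 4 it coincides with Lean's Int.ediv
theorem pvFloordiv4 (i : Int) : PySem.Int.floordiv i 4 = i / 4 := by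
  simp [PySem.Int.floordiv]
  exact Int.fdiv_eq_ediv_of_nonneg i (by norm_num)

-- the 'while i > 0' loop, carrying (i, result); terminates because i //= 4 strictly decreases positive i
def pvALoop (i : Int) (result : Int) : Int :=
  if h : i > 0 then
    pvALoop (PySem.Int.floordiv i 4) (result * 2)
  else
    result
termination_by i.toNat
decreasing_by
  have h4 : PySem.Int.floordiv i 4 = i / 4 := pvFloordiv4 i
  omega

def very_approx_sqrt_py (i : Int) : Int :=
  pvALoop (PySem.Int.floordiv i 4) 1

-- ===== PORT B =====
-- 'if i <= 0: return 1' then '1 << ((i.bit_length() - 1) // 2)';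
-- bit_length of positive i is Nat.log2 i.toNat + 1, and 1 <<< k = 2 ^ k on Int
def very_approx_sqrt_py_alt (i : Int) : Int :=
  if i ≤ 0 then 1
  else (2 : Int) ^ ((Nat.log2 i.toNat + 1 - 1) / 2)

-- ===== PRECONDITION & SPEC =====
def Spec_very_approx_sqrt_py (i : Int) (out : Int) : Prop := out = very_approx_sqrt_py_alt i
instance (i : Int) (out : Int) : Decidable (Spec_very_approx_sqrt_py i out) := by unfold Spec_very_approx_sqrt_py; infer_instance

-- ===== CLAIM (what is proved, stated in full; the proofs are below) =====
def Claim_equal_very_approx_sqrt_py : Prop := ∀ (i : Int), Dom_very_approx_sqrt_py i → Spec_very_approx_sqrt_py i (very_approx_sqrt_py i)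

-- ===== LEMMAS AND PROOFS =====

theorem pvALoop_nonpos (i r : Int) (h : ¬ i > 0) : pvALoop i r = r := by
  rw [pvALoop]; simp [h]

theorem floordiv_four_nonneg (i : Int) (_h : 0 ≤ i) :
    PySem.Int.floordiv i 4 = ((i.toNat / 4 : Nat) : Int) := by
  rw [pvFloordiv4]; omega

theorem log2_div_four (n : Nat) (h : 4 ≤ n) : Nat.log2 (n / 4) = Nat.log2 n - 2 := by
  have h2 : n / 4 = n / 2 / 2 := by omega
  rw [Nat.log2_eq_log_two, Nat.log2_eq_log_two, h2,
    Nat.log_div_base, Nat.log_div_base]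
  omega

theorem log2_ge_two (n : Nat) (h : 4 ≤ n) : 2 ≤ Nat.log2 n := by
  have : Nat.log2 4 ≤ Nat.log2 n := by
    rw [Nat.log2_eq_log_two, Nat.log2_eq_log_two]
    exact Nat.log_mono_right h
  simpa using this

theorem log2_small (n : Nat) (h1 : 1 ≤ n) (h2 : n < 4) : Nat.log2 n / 2 = 0 := by
  interval_cases n <;> decide

theorem pvALoop_closed (n : Nat) : ∀ r : Int,
    pvALoop (n : Int) r = r * (if n = 0 then 1 else 2 ^ (Nat.log2 n / 2 + 1)) := by
  induction n using Nat.strong_induction_on with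
  | _ n ih =>
    intro r
    by_cases h0 : n = 0
    · subst h0
      rw [pvALoop_nonpos _ _ (by norm_num)]
      simp
    · have hpos : (0 : Int) < (n : Int) := by exact_mod_cast Nat.pos_of_ne_zero h0
      rw [pvALoop, dif_pos hpos, floordiv_four_nonneg _ (by omega)]
      have htn : ((n : Int)).toNat = n := by omega
      rw [htn, ih (n / 4) (by omega)]
      by_cases h4 : n < 4
      · have hq : n / 4 = 0 := by omega
        rw [hq, if_pos rfl, if_neg h0, log2_small n (by omega) h4]
        ring
      · have h4' : 4 ≤ n := by omega
        have hq : ¬ n / 4 = 0 := by omega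
        rw [if_neg hq, if_neg h0, log2_div_four n h4']
        have he : (Nat.log2 n - 2) / 2 + 1 + 1 = Nat.log2 n / 2 + 1 := by
          have := log2_ge_two n h4'
          omega
        calc r * 2 * 2 ^ ((Nat.log2 n - 2) / 2 + 1)
            = r * 2 ^ ((Nat.log2 n - 2) / 2 + 1 + 1) := by ring
          _ = r * 2 ^ (Nat.log2 n / 2 + 1) := by rw [he]

-- ===== VERDICT (by name: the statement is the Claim_ definition above) =====
theorem very_approx_sqrt_py_spec : Claim_equal_very_approx_sqrt_py := by
  intro i _
  unfold Spec_very_approx_sqrt_py very_approx_sqrt_py very_approx_sqrt_py_alt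
  by_cases hle : i ≤ 0
  · rw [if_pos hle]
    have : ¬ PySem.Int.floordiv i 4 > 0 := by
      rw [pvFloordiv4]; omega
    exact pvALoop_nonpos _ _ this
  · rw [if_neg hle]
    rw [floordiv_four_nonneg _ (by omega)]
    set n := i.toNat with hn
    have hnpos : 1 ≤ n := by omega
    rw [pvALoop_closed]
    by_cases h4 : n < 4
    · have hq : n / 4 = 0 := by omega
      rw [hq, if_pos rfl]
      rw [show Nat.log2 n + 1 - 1 = Nat.log2 n from rfl, log2_small n hnpos h4]
      norm_num
    · have h4' : 4 ≤ n := by omega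
      have hq : ¬ n / 4 = 0 := by omega
      rw [if_neg hq, log2_div_four n h4']
      have he : (Nat.log2 n - 2) / 2 + 1 = (Nat.log2 n + 1 - 1) / 2 := by
        have := log2_ge_two n h4'
        omega
      rw [he]
      ring
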